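-- pv_equiv track=rewrite | github.com/kyungnankim/bit_seoul | 2020final_project/2020-12-09_04.py | rangmax
-- ===== SOURCE A (Python) =====
-- def rangmax(l):
-- 	acc=0
-- 	maxi=0
-- 	rang=0
-- 	for i in range(0,len(l)):
-- 		acc+=1
-- 		if l[i]>maxi:
-- 			maxi=l[i]
-- 			rang=acc
-- 	return rang
-- ===== SOURCE B (Python) =====
-- def rangmax(l):
--     M = max(l, default=0)
--     return l.index(M) + 1 if M > 0 else 0
-- ===== Notes on version B (the rewrite author's own statement) =====
-- stated objective: simpler
-- what changed: Replaces the running-max scan with explicit state (acc/maxi/rang) by a two-step decomposition: take the global maximum (default 0) and, when positive, return one plus the index of its first occurrence.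
import Mathlib
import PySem

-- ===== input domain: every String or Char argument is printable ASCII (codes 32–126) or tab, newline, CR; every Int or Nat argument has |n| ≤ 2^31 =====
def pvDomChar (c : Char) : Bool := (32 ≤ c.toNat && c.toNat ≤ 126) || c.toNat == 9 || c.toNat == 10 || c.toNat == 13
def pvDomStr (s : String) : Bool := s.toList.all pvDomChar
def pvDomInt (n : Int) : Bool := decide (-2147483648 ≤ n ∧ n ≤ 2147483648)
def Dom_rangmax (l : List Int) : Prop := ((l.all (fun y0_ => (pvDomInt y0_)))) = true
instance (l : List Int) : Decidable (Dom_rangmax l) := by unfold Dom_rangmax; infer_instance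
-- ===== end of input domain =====

-- B replaces A's single running-max scan (acc/maxi/rang state) by: global maximum (default 0), then
-- first-occurrence index when that maximum is positive; same O(n) cost, simpler decomposition.


-- ===== PORT A =====
-- one step of A's loop body on the state (acc, maxi, rang)
def rangmaxStep (st : Int × Int × Int) (x : Int) : Int × Int × Int :=
  let acc := st.1 + 1
  if x > st.2.1 then (acc, x, acc) else (acc, st.2.1, st.2.2)

def rangmax (l : List Int) : Int :=
  (l.foldl rangmaxStep ((0 : Int), (0 : Int), (0 : Int))).2.2

-- ===== PORT B =====
def rangmax_alt (l : List Int) : Int :=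
  let M := PySem.List.maxD l (fun x => x) 0     -- max(l, default=0)
  if M > 0 then
    match PySem.List.index? l M with            -- l.index(M); some, since M ∈ l when M > 0
    | some i => (i : Int) + 1
    | none => 0
  else 0

-- ===== PRECONDITION & SPEC =====
def Spec_rangmax (l : List Int) (out : Int) : Prop := out = rangmax_alt l
instance (l : List Int) (out : Int) : Decidable (Spec_rangmax l out) := by unfold Spec_rangmax; infer_instance

-- ===== CLAIM (what is proved, stated in full; the proofs are below) =====
def Claim_equal_rangmax : Prop := ∀ (l : List Int), Dom_rangmax l → Spec_rangmax l (rangmax l)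

-- ===== LEMMAS AND PROOFS =====

-- A's loop from an arbitrary state: if the list raises the running max, the final rang is
-- acc + (first index of the new overall max) + 1; otherwise rang is unchanged.
theorem rangmax_fold_spec (l : List Int) :
    ∀ (acc maxi rang : Int),
      (l.foldl max maxi > maxi →
        ∃ k, List.idxOf? (l.foldl max maxi) l = some k ∧
          (l.foldl rangmaxStep (acc, maxi, rang)).2.2 = acc + (k : Int) + 1) ∧
      (l.foldl max maxi ≤ maxi →
        (l.foldl rangmaxStep (acc, maxi, rang)).2.2 = rang) := by
  induction l with
  | nil => intro acc maxi rang; exact ⟨fun h => absurd h (by simp), fun _ => rfl⟩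
  | cons x xs ih =>
    intro acc maxi rang
    have hxle : x ≤ xs.foldl max x := (PySem.List.le_foldl_max xs x).1
    by_cases hx : x > maxi
    · have hmx : max maxi x = x := max_eq_right (le_of_lt hx)
      have hstep : (x :: xs).foldl rangmaxStep (acc, maxi, rang)
          = xs.foldl rangmaxStep (acc + 1, x, acc + 1) := by
        simp [List.foldl_cons, rangmaxStep, hx]
      have hM : (x :: xs).foldl max maxi = xs.foldl max x := by
        simp [List.foldl_cons, hmx]
      constructor
      · intro _
        rcases lt_or_ge x (xs.foldl max x) with hlt | hge
        · obtain ⟨k, hk, hres⟩ := (ih (acc + 1) x (acc + 1)).1 hlt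
          refine ⟨k + 1, ?_, ?_⟩
          · have hne : (x == xs.foldl max x) = false := by
              rw [beq_eq_false_iff_ne]; omega
            rw [hM, List.idxOf?_cons, hne]
            simp [hk]
          · rw [hstep, hres]; push_cast; ring
        · have heq : xs.foldl max x = x := le_antisymm hge hxle
          refine ⟨0, ?_, ?_⟩
          · rw [hM, heq]; simp [List.idxOf?_cons]
          · have := (ih (acc + 1) x (acc + 1)).2 (by omega)
            rw [hstep, this]; ring
      · intro h
        rw [hM] at h; omega
    · rw [not_lt] at hx
      have hmx : max maxi x = maxi := max_eq_left hx
      have hstep : (x :: xs).foldl rangmaxStep (acc, maxi, rang)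
          = xs.foldl rangmaxStep (acc + 1, maxi, rang) := by
        simp [List.foldl_cons, rangmaxStep, not_lt.mpr hx]
      have hM : (x :: xs).foldl max maxi = xs.foldl max maxi := by
        simp [List.foldl_cons, hmx]
      constructor
      · intro hgt
        rw [hM] at hgt
        obtain ⟨k, hk, hres⟩ := (ih (acc + 1) maxi rang).1 hgt
        refine ⟨k + 1, ?_, ?_⟩
        · have hne : (x == xs.foldl max maxi) = false := by
            rw [beq_eq_false_iff_ne]; omega
          rw [hM, List.idxOf?_cons, hne]
          simp [hk]
        · rw [hstep, hres]; push_cast; ring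
      · intro h
        rw [hM] at h
        exact hstep ▸ (ih (acc + 1) maxi rang).2 h

-- pulling the initial 0 out of the running max
theorem foldl_max_zero_cons (x : Int) (xs : List Int) :
    (x :: xs).foldl max 0 = max 0 (xs.foldl max x) := by
  show xs.foldl max (max 0 x) = max 0 (xs.foldl max x)
  induction xs generalizing x with
  | nil => rfl
  | cons y ys ih =>
    simp only [List.foldl_cons, max_assoc]
    exact ih (max x y)

-- ===== VERDICT (by name: the statement is the Claim_ definition above) =====
theorem rangmax_spec : Claim_equal_rangmax := by
  intro l _
  unfold Spec_rangmax rangmax rangmax_alt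
  cases l with
  | nil => rfl
  | cons x xs =>
    have hB : PySem.List.maxD (x :: xs) (fun y => y) 0 = xs.foldl max x := by
      simp [PySem.List.maxD, PySem.List.max?_id_cons]
    have hA0 : (x :: xs).foldl max 0 = max 0 (xs.foldl max x) := foldl_max_zero_cons x xs
    by_cases hpos : xs.foldl max x > 0
    · have hgt : (x :: xs).foldl max 0 > 0 := by rw [hA0]; omega
      obtain ⟨k, hk, hres⟩ := (rangmax_fold_spec (x :: xs) 0 0 0).1 hgt
      have hMeq : (x :: xs).foldl max 0 = xs.foldl max x := by rw [hA0]; omega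
      rw [hres]
      rw [hMeq] at hk
      simp only [hB, if_pos hpos, PySem.List.index?_eq_idxOf?, hk]
      ring
    · rw [not_lt] at hpos
      have hle : (x :: xs).foldl max 0 ≤ 0 := by rw [hA0]; omega
      have := (rangmax_fold_spec (x :: xs) 0 0 0).2 hle
      rw [this]
      simp [hB, not_lt.mpr hpos]
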